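-- pv_equiv track=rewrite | github.com/mrbeam/MrBeamPlugin | octoprint_mrbeam/comm_acc2.py | strip_comment
-- ===== SOURCE A (Python) =====
-- def strip_comment(line):
-- 	if not ";" in line:
-- 		# shortcut
-- 		return line
--
-- 	escaped = False
-- 	result = []
-- 	for c in line:
-- 		if c == ";" and not escaped:
-- 			break
-- 		result += c
-- 		escaped = (c == "\\") and not escaped
-- 	return "".join(result)
-- ===== SOURCE B (Python) =====
-- def strip_comment(line):
--     parts = line.split(";")
--     result = parts[0]
--     for part in parts[1:]:
--         trailing = len(result) - len(result.rstrip("\\"))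
--         if trailing % 2 == 0:
--             break
--         result += ";" + part
--     return result
-- ===== Notes on version B (the rewrite author's own statement) =====
-- stated objective: alternative
-- what changed: B splits the line on ';' once and rejoins parts while the accumulated result ends in an odd number of backslashes, instead of A's per-character scan with a running escaped flag.
import Mathlib
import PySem

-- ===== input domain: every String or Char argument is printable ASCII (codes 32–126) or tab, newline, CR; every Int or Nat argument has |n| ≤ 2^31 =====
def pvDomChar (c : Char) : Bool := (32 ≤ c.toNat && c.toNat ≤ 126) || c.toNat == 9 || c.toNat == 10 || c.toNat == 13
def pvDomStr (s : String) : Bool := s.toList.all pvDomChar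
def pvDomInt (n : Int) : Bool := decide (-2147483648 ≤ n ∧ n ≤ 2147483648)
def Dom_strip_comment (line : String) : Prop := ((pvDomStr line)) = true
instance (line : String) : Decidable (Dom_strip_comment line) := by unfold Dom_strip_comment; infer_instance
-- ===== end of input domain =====

-- B replaces A's per-character scan with a running escaped flag by one split on ';' plus a
-- rejoin loop driven by trailing-backslash parity (objective: alternative decomposition, same cost).

-- ===== PORT A =====
-- the for-loop with `break`: state is the escaped flag; `result` is built structurally
def stripLoopA : List Char → Bool → List Char
  | [], _ => []
  | c :: rest, escaped =>
      if c = ';' ∧ escaped = false then []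
      else c :: stripLoopA rest ((c == '\\') && !escaped)

def strip_comment (line : String) : String :=
  if ';' ∉ line.toList then line          -- `if not ";" in line: return line`
  else String.ofList (stripLoopA line.toList false)

-- ===== PORT B =====
-- hand port of `line.split(";")` (single-character separator; exact: same pieces, same order)
def splitSemi : List Char → List (List Char)
  | [] => [[]]
  | c :: t =>
      if c = ';' then [] :: splitSemi t
      else match splitSemi t with
           | [] => [[c]]          -- unreachable: splitSemi never returns []
           | p :: ps => (c :: p) :: ps

-- `len(result) - len(result.rstrip("\\"))`: the number of trailing backslashes (exact)
def trailBS (res : List Char) : Nat := (res.reverse.takeWhile (fun c => c == '\\')).length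

-- the for-loop over parts[1:] with `break`
def stripLoopB : List Char → List (List Char) → List Char
  | res, [] => res
  | res, p :: ps =>
      if trailBS res % 2 = 0 then res else stripLoopB (res ++ ';' :: p) ps

def strip_comment_alt (line : String) : String :=
  match splitSemi line.toList with
  | [] => ""                               -- unreachable
  | p :: ps => String.ofList (stripLoopB p ps)

-- ===== PRECONDITION & SPEC =====
def Spec_strip_comment (line : String) (out : String) : Prop := out = strip_comment_alt line
instance (line : String) (out : String) : Decidable (Spec_strip_comment line out) := by unfold Spec_strip_comment; infer_instance

-- ===== CLAIM (what is proved, stated in full; the proofs are below) =====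
def Claim_equal_strip_comment : Prop := ∀ (line : String), Dom_strip_comment line → Spec_strip_comment line (strip_comment line)

-- ===== LEMMAS AND PROOFS =====

-- A's escaped flag as a fold
def escF (l : List Char) (e : Bool) : Bool := l.foldl (fun e c => (c == '\\') && !e) e

theorem splitSemi_ne_nil (l : List Char) : splitSemi l ≠ [] := by
  cases l with
  | nil => simp [splitSemi]
  | cons c t =>
      simp only [splitSemi]
      split
      · simp
      · split <;> simp

theorem splitSemi_no_semi (l : List Char) (h : ';' ∉ l) : splitSemi l = [l] := by
  induction l with
  | nil => rfl
  | cons c t ih =>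
      simp only [List.mem_cons, not_or] at h
      have hc : ¬ c = ';' := fun hcc => h.1 hcc.symm
      simp only [splitSemi, if_neg hc, ih h.2]

theorem splitSemi_append (p rest : List Char) (h : ';' ∉ p) :
    splitSemi (p ++ ';' :: rest) = p :: splitSemi rest := by
  induction p with
  | nil => simp [splitSemi]
  | cons c t ih =>
      simp only [List.mem_cons, not_or] at h
      have hc : ¬ c = ';' := fun hcc => h.1 hcc.symm
      simp only [List.cons_append, splitSemi, if_neg hc, ih h.2]

theorem takeWhile_append_stop {α : Type} (P : α → Bool) (x : List α) (c : α) (y : List α)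
    (hc : P c = false) : (x ++ c :: y).takeWhile P = x.takeWhile P := by
  induction x with
  | nil => simp [List.takeWhile, hc]
  | cons a t ih =>
      simp only [List.cons_append, List.takeWhile]
      cases P a <;> simp [ih]

theorem trailBS_append_semi (a b : List Char) : trailBS (a ++ ';' :: b) = trailBS b := by
  unfold trailBS
  rw [List.reverse_append, List.reverse_cons, List.append_assoc, List.singleton_append,
      takeWhile_append_stop _ _ ';' _ (by decide)]

theorem stripLoopA_seg (p : List Char) (h : ';' ∉ p) :
    ∀ (rest : List Char) (e : Bool), stripLoopA (p ++ rest) e = p ++ stripLoopA rest (escF p e) := by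
  induction p with
  | nil => intro rest e; simp [escF]
  | cons c t ih =>
      intro rest e
      simp only [List.mem_cons, not_or] at h
      simp only [List.cons_append, stripLoopA, escF, List.foldl_cons]
      have hc : ¬ c = ';' := fun hcc => h.1 hcc.symm
      rw [if_neg (by simp [hc])]
      simp [ih h.2 rest, escF]

theorem escF_parity (p : List Char) : escF p false = decide (trailBS p % 2 = 1) := by
  induction p using List.reverseRecOn with
  | nil => simp [escF, trailBS]
  | append_singleton q c ih =>
      have hfold : escF (q ++ [c]) false = ((c == '\\') && !(escF q false)) := by
        simp [escF, List.foldl_append]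
      rw [hfold, ih]
      by_cases hc : c = '\\'
      · subst hc
        have : trailBS (q ++ ['\\']) = trailBS q + 1 := by
          simp [trailBS]
        rw [this]
        rcases Nat.even_or_odd (trailBS q) with he | ho
        · have h0 : trailBS q % 2 = 0 := Nat.even_iff.mp he
          simp [h0, Nat.add_mod]
        · have h1 : trailBS q % 2 = 1 := Nat.odd_iff.mp ho
          simp [h1, Nat.add_mod]
      · have : trailBS (q ++ [c]) = 0 := by
          simp [trailBS, hc]
        rw [this]
        simp [hc]

theorem stripLoopB_shift (ps : List (List Char)) :
    ∀ (a res : List Char), stripLoopB (a ++ ';' :: res) ps = a ++ ';' :: stripLoopB res ps := by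
  induction ps with
  | nil => intro a res; rfl
  | cons p t ih =>
      intro a res
      simp only [stripLoopB, trailBS_append_semi]
      split
      · rfl
      · simpa [List.append_assoc] using ih a (res ++ ';' :: p)

-- B's value as a function of the character list
def stripB (l : List Char) : List Char :=
  match splitSemi l with
  | [] => []
  | p :: ps => stripLoopB p ps

theorem dropWhile_head_false {α : Type} (P : α → Bool) (l : List α) (x : α) (xs : List α)
    (h : l.dropWhile P = x :: xs) : P x = false := by
  induction l with
  | nil => simp [List.dropWhile] at h
  | cons a t ih =>
      simp only [List.dropWhile] at h
      by_cases ha : P a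
      · exact ih (by simpa [ha] using h)
      · simp only [ha] at h
        cases h
        simpa using ha

theorem main_eq : ∀ (n : Nat) (l : List Char), l.length ≤ n → stripLoopA l false = stripB l := by
  intro n
  induction n with
  | zero =>
      intro l hl
      have : l = [] := List.length_eq_zero_iff.mp (Nat.le_zero.mp hl)
      subst this
      rfl
  | succ n ih =>
      intro l hl
      by_cases hmem : ';' ∈ l
      · -- decompose at the first ';'
        set p := l.takeWhile (fun c => !(c == ';')) with hp
        set d := l.dropWhile (fun c => !(c == ';')) with hd
        have hld : p ++ d = l := List.takeWhile_append_dropWhile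
        have hdne : d ≠ [] := by
          intro h0
          have : l = p := by rw [← hld, h0, List.append_nil]
          have hmem' := hmem
          rw [this] at hmem'
          have := List.mem_takeWhile_imp hmem'
          simp at this
        obtain ⟨c, rest, hcr⟩ := List.exists_cons_of_ne_nil hdne
        have hc : c = ';' := by
          have := dropWhile_head_false _ l c rest (by rw [← hd, hcr])
          simpa using this
        subst hc
        have hnp : ';' ∉ p := by
          intro hin
          have := List.mem_takeWhile_imp hin
          simp at this
        have hl' : l = p ++ ';' :: rest := by rw [← hld, hcr]
        have hlen : rest.length ≤ n := by
          have := hl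
          rw [hl'] at this
          simp [List.length_append] at this
          omega
        rw [hl', stripLoopA_seg p hnp]
        have hsplit : stripB (p ++ ';' :: rest) = stripLoopB p (splitSemi rest) := by
          unfold stripB
          rw [splitSemi_append p rest hnp]
        rw [hsplit]
        obtain ⟨q, qs, hqs⟩ := List.exists_cons_of_ne_nil (splitSemi_ne_nil rest)
        rw [hqs]
        simp only [stripLoopA, escF_parity]
        by_cases hpar : trailBS p % 2 = 0
        · have h1 : ¬ (trailBS p % 2 = 1) := by omega
          rw [if_pos (by simp [h1]), stripLoopB]
          rw [if_pos hpar]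
          simp
        · have h1 : trailBS p % 2 = 1 := by omega
          rw [if_neg (by simp [h1]), stripLoopB, if_neg hpar]
          have hb : stripLoopB (p ++ ';' :: q) qs = p ++ ';' :: stripLoopB q qs :=
            stripLoopB_shift qs p q
          rw [hb]
          have hrest : stripLoopA rest false = stripB rest := ih rest hlen
          have : stripB rest = stripLoopB q qs := by unfold stripB; rw [hqs]
          simp [hrest, this]
      · -- no semicolon: both sides are l
        have hA : stripLoopA l false = l := by
          have := stripLoopA_seg l hmem [] false
          simpa [stripLoopA] using this
        have hB : stripB l = l := by
          unfold stripB
          rw [splitSemi_no_semi l hmem]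
          rfl
        rw [hA, hB]

theorem alt_eq_stripB (line : String) : strip_comment_alt line = String.ofList (stripB line.toList) := by
  unfold strip_comment_alt stripB
  obtain ⟨q, qs, hqs⟩ := List.exists_cons_of_ne_nil (splitSemi_ne_nil line.toList)
  rw [hqs]

-- ===== VERDICT (by name: the statement is the Claim_ definition above) =====
theorem strip_comment_spec : Claim_equal_strip_comment := by
  intro line _
  unfold Spec_strip_comment strip_comment
  rw [alt_eq_stripB]
  by_cases hmem : ';' ∈ line.toList
  · rw [if_neg (by simpa using hmem)]
    rw [main_eq line.toList.length line.toList (le_refl _)]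
  · rw [if_pos (by simpa using hmem)]
    have : stripB line.toList = line.toList := by
      unfold stripB
      rw [splitSemi_no_semi _ hmem]
      rfl
    rw [this, String.ofList_toList]
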